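-- pv_equiv track=rewrite | github.com/CMGSK/aoc-15 | day05/program.py | contains_vowels
-- ===== SOURCE A (Python) =====
-- def contains_vowels(line):
--     vowels = 'a', 'e', 'i', 'o', 'u'
--     r = 0
--     for c in line:
--         if c in vowels:
--             r += 1
--     if r >= 3:
--         return True
--     else:
--         return False
-- ===== SOURCE B (Python) =====
-- def contains_vowels(line):
--     r = 0
--     for v in 'aeiou':
--         r += line.count(v)
--     return r >= 3
-- ===== Notes on version B (the rewrite author's own statement) =====
-- stated objective: faster
-- what changed: Instead of a Python-level character-by-character pass testing membership in a vowel tuple, B loops over the five vowels and sums line.count(v), then tests the sum against 3; the per-character work moves into the C-implemented str.count.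
import Mathlib
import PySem

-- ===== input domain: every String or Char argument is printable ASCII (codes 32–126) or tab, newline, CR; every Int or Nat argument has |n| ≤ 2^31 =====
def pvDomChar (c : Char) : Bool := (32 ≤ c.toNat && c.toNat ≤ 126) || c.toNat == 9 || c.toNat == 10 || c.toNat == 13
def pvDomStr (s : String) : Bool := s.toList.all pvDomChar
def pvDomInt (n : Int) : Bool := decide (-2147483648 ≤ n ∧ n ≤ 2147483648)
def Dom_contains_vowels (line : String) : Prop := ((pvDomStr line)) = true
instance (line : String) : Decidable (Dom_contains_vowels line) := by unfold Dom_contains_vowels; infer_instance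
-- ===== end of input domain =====

-- B replaces A's per-character membership pass with five per-vowel line.count scans summed; measured faster at large sizes (constant-factor: counting moves into str.count).


-- ===== PORT A =====
-- vowels = 'a','e','i','o','u'; r = 0; for c in line: if c in vowels: r += 1; return r >= 3
def contains_vowels (line : String) : Bool :=
  let vowels : List Char := ['a', 'e', 'i', 'o', 'u']
  let r : Int := line.toList.foldl (fun r c => if c ∈ vowels then r + 1 else r) 0
  if r ≥ 3 then true else false

-- ===== PORT B =====
-- r = 0; for v in 'aeiou': r += line.count(v); return r >= 3
def contains_vowels_alt (line : String) : Bool :=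
  let r : Int :=
    "aeiou".toList.foldl (fun r v => r + (PySem.Str.count line (String.ofList [v]) : Int)) 0
  decide (r ≥ 3)

-- ===== PRECONDITION & SPEC =====
def Spec_contains_vowels (line : String) (out : Bool) : Prop := out = contains_vowels_alt line
instance (line : String) (out : Bool) : Decidable (Spec_contains_vowels line out) := by unfold Spec_contains_vowels; infer_instance

-- ===== CLAIM (what is proved, stated in full; the proofs are below) =====
def Claim_equal_contains_vowels : Prop := ∀ (line : String), Dom_contains_vowels line → Spec_contains_vowels line (contains_vowels line)

-- ===== LEMMAS AND PROOFS =====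

-- single-character substring count is character count
theorem count_go_single (c : Char) (l : List Char) (fuel acc : Nat) (h : l.length ≤ fuel) :
    PySem.Chars.count.go [c] fuel l acc = acc + l.count c := by
  induction l generalizing fuel acc with
  | nil =>
    cases fuel <;> simp [PySem.Chars.count.go]
  | cons x t ih =>
    cases fuel with
    | zero => simp at h
    | succ n =>
      rw [PySem.Chars.count.go]
      by_cases hx : c = x
      · subst hx
        simp only [List.isPrefixOf, beq_self_eq_true, Bool.true_and, if_true, List.length_cons, List.length_nil, Nat.zero_add, List.drop_one, List.tail_cons]
        rw [ih _ _ (by simp at h; omega)]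
        simp
        omega
      · have hbx : (c == x) = false := by simp [hx]
        simp only [List.isPrefixOf, hbx, Bool.false_and, if_neg Bool.false_ne_true]
        rw [ih _ _ (by simp at h; omega)]
        have : ¬ x = c := fun e => hx e.symm
        simp [this]

theorem count_single (cs : List Char) (c : Char) :
    PySem.Chars.count cs [c] = cs.count c := by
  simp only [PySem.Chars.count, List.isEmpty_cons, if_neg Bool.false_ne_true]
  simpa using count_go_single c cs cs.length 0 (le_refl _)

theorem foldl_mem_count (l : List Char) (a : Int) :
    l.foldl (fun r c => if c ∈ (['a','e','i','o','u'] : List Char) then r + 1 else r) a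
      = a + l.count 'a' + l.count 'e' + l.count 'i' + l.count 'o' + l.count 'u' := by
  induction l generalizing a with
  | nil => simp
  | cons x t ih =>
    simp only [List.foldl_cons, ih, List.count_cons]
    by_cases hx : x ∈ (['a','e','i','o','u'] : List Char)
    · fin_cases hx <;> simp <;> push_cast <;> ring
    · simp only [if_neg hx]
      simp only [List.mem_cons, not_or, List.not_mem_nil] at hx
      obtain ⟨ha, he, hi, ho, hu, -⟩ := hx
      have ba : (x == 'a') = false := by simp [ha]
      have bb : (x == 'e') = false := by simp [he]
      have bc : (x == 'i') = false := by simp [hi]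
      have bd : (x == 'o') = false := by simp [ho]
      have be : (x == 'u') = false := by simp [hu]
      simp [ba, bb, bc, bd, be]

-- ===== VERDICT (by name: the statement is the Claim_ definition above) =====
theorem contains_vowels_spec : Claim_equal_contains_vowels := by
  intro line _
  unfold Spec_contains_vowels contains_vowels contains_vowels_alt
  simp only [foldl_mem_count]
  have : ("aeiou".toList : List Char) = ['a','e','i','o','u'] := rfl
  rw [this]
  simp only [List.foldl_cons, List.foldl_nil, PySem.Str.count_eq, String.toList_ofList,
    count_single]
  split_ifs with h
  · simp; omega
  · simp; omega
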